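-- pv_equiv track=rewrite | github.com/kimnanhee/Algorithm | Leet_2211_countCollisions.py | countCollisions
-- ===== SOURCE A (Python) =====
-- def countCollisions(directions: str) -> int:
--     # 양 끝을 제외하고 가운데 충동하는 부분만 계산
--     # return len(directions.lstrip('L').rstrip('R').replace('S', ''))
--
--     directions = list(directions)
--
--     cnt = 0 # 충돌 횟수
--     rcnt = 0
--
--     for i in range(1, len(directions)):
--         if directions[i-1] == 'R' and directions[i] == 'L':
--             directions[i-1] = directions[i] = 'S'
--             cnt += (2 + rcnt)
--             rcnt = 0
--         elif directions[i-1] == 'S' and directions[i] == 'L':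
--             directions[i] = 'S'
--             cnt += 1
--         elif directions[i-1] == 'R' and directions[i] == 'S':
--             directions[i-1] = 'S'
--             cnt += (1 + rcnt)
--             rcnt = 0
--         elif directions[i-1] == 'R' and directions[i] == 'R':
--             rcnt += 1
--
--     return cnt
-- ===== SOURCE B (Python) =====
-- def countCollisions(directions: str) -> int:
--     pairs = list(zip(directions, directions[1:]))
--     # meeting points: a right-moving car runs into an 'L' or an 'S' just ahead
--     events = sum(1 for a, b in pairs if a == 'R' and b in ('L', 'S'))
--     # extra right-moving cars absorbed into a pile: an adjacent R,R pair
--     # contributes one collision iff some meeting point lies to its right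
--     rr = 0
--     seen = False
--     for a, b in reversed(pairs):
--         if a == 'R' and b in ('L', 'S'):
--             seen = True
--         elif a == 'R' and b == 'R' and seen:
--             rr += 1
--     # left-moving cars that stop: an 'L' collides iff the nearest
--     # non-'L' character to its left is 'R' or 'S'
--     lcnt = 0
--     near = None
--     for ch in directions:
--         if ch != 'L':
--             near = ch
--         elif near in ('R', 'S'):
--             lcnt += 1
--     return events + rr + lcnt
-- ===== Notes on version B (the rewrite author's own statement) =====
-- stated objective: alternative
-- what changed: Replaces A's stateful scan (rewriting cells to 'S' and carrying a pending rcnt counter) by three independent closed-form counts over the adjacent-pair list: meeting points (R followed by L/S), R,R pairs with a meeting point to their right, and L's whose nearest non-L left neighbour is R or S.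
import Mathlib
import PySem

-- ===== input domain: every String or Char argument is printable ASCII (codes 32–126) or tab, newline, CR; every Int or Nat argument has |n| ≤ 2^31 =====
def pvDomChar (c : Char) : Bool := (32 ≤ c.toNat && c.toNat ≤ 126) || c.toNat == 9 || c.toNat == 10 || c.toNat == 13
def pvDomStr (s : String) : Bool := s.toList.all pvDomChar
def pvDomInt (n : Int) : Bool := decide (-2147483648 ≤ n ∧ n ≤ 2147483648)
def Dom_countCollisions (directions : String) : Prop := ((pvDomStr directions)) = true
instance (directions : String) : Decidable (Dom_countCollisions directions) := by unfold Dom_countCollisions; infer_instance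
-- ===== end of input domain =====

-- B replaces A's stateful cell-rewriting scan by three independent counts over the
-- adjacent-pair list (alternative decomposition, same O(n) cost); equivalence proved
-- for every string (A is total).

-- ===== PORT A =====
-- loop body of A: state = (directions list, cnt, rcnt), i the loop index.
-- Indices i-1 and i are always in range (i ∈ range(1, len)), so the .getD / .toNat
-- reads and writes below coincide with Python's xs[i] / xs[i] = v exactly.
def pvStepA (st : List Char × Int × Int) (i : Int) : List Char × Int × Int :=
  let arr := st.1
  let cnt := st.2.1
  let rcnt := st.2.2
  let prev := (PySem.List.pyGet? arr (i - 1)).getD ' '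
  let cur := (PySem.List.pyGet? arr i).getD ' '
  if prev == 'R' && cur == 'L' then
    (((arr.set (i - 1).toNat 'S').set i.toNat 'S'), cnt + (2 + rcnt), 0)
  else if prev == 'S' && cur == 'L' then
    ((arr.set i.toNat 'S'), cnt + 1, rcnt)
  else if prev == 'R' && cur == 'S' then
    ((arr.set (i - 1).toNat 'S'), cnt + (1 + rcnt), 0)
  else if prev == 'R' && cur == 'R' then
    (arr, cnt, rcnt + 1)
  else
    (arr, cnt, rcnt)

def countCollisions (directions : String) : Int :=
  let arr := directions.toList
  let st := (PySem.List.pyRange 1 (arr.length : Int) 1).foldl pvStepA (arr, (0 : Int), (0 : Int))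
  st.2.1

-- ===== PORT B =====
-- loop body of B's reversed(pairs) pass: state = (rr, seen)
def pvStepSeen (st : Int × Bool) (ab : Char × Char) : Int × Bool :=
  if ab.1 == 'R' && (ab.2 == 'L' || ab.2 == 'S') then (st.1, true)
  else if ab.1 == 'R' && ab.2 == 'R' && st.2 then (st.1 + 1, st.2)
  else st

-- loop body of B's last pass: state = (near, lcnt)
def pvStepNear (st : Option Char × Int) (ch : Char) : Option Char × Int :=
  if ch != 'L' then (some ch, st.2)
  else if st.1 == some 'R' || st.1 == some 'S' then (st.1, st.2 + 1)
  else st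

def countCollisions_alt (directions : String) : Int :=
  let cs := directions.toList
  let pairs := cs.zip (cs.drop 1)       -- zip(directions, directions[1:])
  let events : Int := (pairs.countP (fun ab => ab.1 == 'R' && (ab.2 == 'L' || ab.2 == 'S')) : Nat)
  let rrSeen := pairs.reverse.foldl pvStepSeen ((0 : Int), false)
  let lc := cs.foldl pvStepNear ((none : Option Char), (0 : Int))
  events + rrSeen.1 + lc.2

-- ===== PRECONDITION & SPEC =====
def Spec_countCollisions (directions : String) (out : Int) : Prop := out = countCollisions_alt directions
instance (directions : String) (out : Int) : Decidable (Spec_countCollisions directions out) := by unfold Spec_countCollisions; infer_instance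

-- ===== CLAIM (what is proved, stated in full; the proofs are below) =====
def Claim_equal_countCollisions : Prop := ∀ (directions : String), Dom_countCollisions directions → Spec_countCollisions directions (countCollisions directions)

-- ===== LEMMAS AND PROOFS =====

-- the one-pass automaton both programs compute: p = effective previous cell, r = rcnt
def pvAuto : Char → Int → List Char → Int
  | _, _, [] => 0
  | p, r, c :: t =>
    if p = 'R' ∧ c = 'L' then 2 + r + pvAuto 'S' 0 t
    else if p = 'S' ∧ c = 'L' then 1 + pvAuto 'S' r t
    else if p = 'R' ∧ c = 'S' then 1 + r + pvAuto 'S' 0 t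
    else if p = 'R' ∧ c = 'R' then pvAuto 'R' (r + 1) t
    else pvAuto c r t

-- B's three counts, as structural recursions over "previous char p, rest t"
def pvEvs : Char → List Char → Nat
  | _, [] => 0
  | p, c :: t => (if p = 'R' ∧ (c = 'L' ∨ c = 'S') then 1 else 0) + pvEvs c t

def pvHasE : Char → List Char → Bool
  | _, [] => false
  | p, c :: t => (decide (p = 'R' ∧ (c = 'L' ∨ c = 'S'))) || pvHasE c t

def pvRrc : Char → List Char → Nat
  | _, [] => 0
  | p, c :: t => (if p = 'R' ∧ c = 'R' ∧ pvHasE c t then 1 else 0) + pvRrc c t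

def pvLcc : Bool → List Char → Nat
  | _, [] => 0
  | q, c :: t => if c = 'L' then (if q then 1 else 0) + pvLcc q t else pvLcc (decide (c = 'R' ∨ c = 'S')) t

theorem pvEvs_congr {p q : Char} (t : List Char) (hp : p ≠ 'R') (hq : q ≠ 'R') :
    pvEvs p t = pvEvs q t := by
  cases t with
  | nil => rfl
  | cons c t => simp [pvEvs, hp, hq]

theorem pvHasE_congr {p q : Char} (t : List Char) (hp : p ≠ 'R') (hq : q ≠ 'R') :
    pvHasE p t = pvHasE q t := by
  cases t with
  | nil => rfl
  | cons c t => simp [pvHasE, hp, hq]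

theorem pvRrc_congr {p q : Char} (t : List Char) (hp : p ≠ 'R') (hq : q ≠ 'R') :
    pvRrc p t = pvRrc q t := by
  cases t with
  | nil => rfl
  | cons c t => simp [pvRrc, hp, hq]

-- decomposition of the automaton into B's three counts
theorem pvAuto_decomp : ∀ (t : List Char) (p : Char) (r : Int),
    pvAuto p r t = (pvEvs p t : Int) + (if pvHasE p t then r else 0)
      + (pvRrc p t : Int) + (pvLcc (decide (p = 'R' ∨ p = 'S')) t : Int) := by
  intro t
  induction t with
  | nil => intro p r; simp [pvAuto, pvEvs, pvHasE, pvRrc, pvLcc]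
  | cons c t ih =>
    intro p r
    by_cases h1 : p = 'R' ∧ c = 'L'
    · obtain ⟨hp, hc⟩ := h1
      subst hp; subst hc
      rw [show pvAuto 'R' r ('L' :: t) = 2 + r + pvAuto 'S' 0 t by simp [pvAuto], ih]
      rw [pvEvs_congr (p := 'S') (q := 'L') t (by decide) (by decide),
          pvHasE_congr (p := 'S') (q := 'L') t (by decide) (by decide),
          pvRrc_congr (p := 'S') (q := 'L') t (by decide) (by decide)]
      simp [pvEvs, pvHasE, pvRrc, pvLcc]
      push_cast
      ring
    · by_cases h2 : p = 'S' ∧ c = 'L'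
      · obtain ⟨hp, hc⟩ := h2
        subst hp; subst hc
        rw [show pvAuto 'S' r ('L' :: t) = 1 + pvAuto 'S' r t by simp [pvAuto], ih]
        rw [pvEvs_congr (p := 'S') (q := 'L') t (by decide) (by decide),
            pvHasE_congr (p := 'S') (q := 'L') t (by decide) (by decide),
            pvRrc_congr (p := 'S') (q := 'L') t (by decide) (by decide)]
        simp [pvEvs, pvHasE, pvRrc, pvLcc]
        push_cast
        ring
      · by_cases h3 : p = 'R' ∧ c = 'S'
        · obtain ⟨hp, hc⟩ := h3
          subst hp; subst hc
          rw [show pvAuto 'R' r ('S' :: t) = 1 + r + pvAuto 'S' 0 t by simp [pvAuto], ih]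
          simp [pvEvs, pvHasE, pvRrc, pvLcc]
          push_cast
          ring
        · by_cases h4 : p = 'R' ∧ c = 'R'
          · obtain ⟨hp, hc⟩ := h4
            subst hp; subst hc
            rw [show pvAuto 'R' r ('R' :: t) = pvAuto 'R' (r + 1) t by simp [pvAuto], ih]
            simp only [pvEvs, pvHasE, pvRrc, pvLcc]
            by_cases hE : pvHasE 'R' t <;> simp [hE] <;> push_cast <;> ring
          · rw [show pvAuto p r (c :: t) = pvAuto c r t by simp [pvAuto, h1, h2, h3, h4], ih]
            have hpR : ¬ p = 'R' ∨ ¬ (c = 'L' ∨ c = 'S') := by tauto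
            have hev : ¬ (p = 'R' ∧ (c = 'L' ∨ c = 'S')) := by tauto
            have hrr : ¬ (p = 'R' ∧ c = 'R' ∧ pvHasE c t) := by tauto
            simp only [pvEvs, pvHasE, pvRrc, pvLcc, hev, hrr, if_neg, decide_eq_true_eq]
            by_cases hcL : c = 'L'
            · subst hcL
              have hq : ¬ (p = 'R' ∨ p = 'S') := by tauto
              simp [hev, hrr, hq]
            · simp [hev, hrr, hcL]

-- ---------- A's loop equals the automaton ----------

theorem pv_drop_set_of_lt {α : Type} (l : List α) (m n : Nat) (a : α) (h : m < n) :
    (l.set m a).drop n = l.drop n := by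
  apply List.ext_getElem?
  intro k
  rw [List.getElem?_drop, List.getElem?_drop, List.getElem?_set]
  split_ifs <;> first | rfl | omega

theorem pvLoopA : ∀ (t arr : List Char) (i : Nat) (p : Char) (cnt r : Int),
    1 ≤ i → arr.drop i = t → arr[i - 1]? = some p →
    ((PySem.List.pyRange (i : Int) (arr.length : Int) 1).foldl pvStepA (arr, cnt, r)).2.1
      = cnt + pvAuto p r t := by
  intro t
  induction t with
  | nil =>
    intro arr i p cnt r hi hd hp
    have hlen : arr.length ≤ i := by
      by_contra h
      have := List.drop_eq_nil_iff.mp hd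
      omega
    rw [PySem.List.pyRange_one_eq_nil (by exact_mod_cast hlen)]
    rw [List.foldl_nil, pvAuto]
    ring
  | cons c t ih =>
    intro arr i p cnt r hi hd hp
    have hilen : i < arr.length := by
      by_contra h
      rw [List.drop_eq_nil_iff.mpr (by omega)] at hd
      simp at hd
    have hci : arr[i]? = some c := by
      have : (arr.drop i)[0]? = some c := by rw [hd]; rfl
      rwa [List.getElem?_drop, Nat.add_zero] at this
    have hd1 : arr.drop (i + 1) = t := by
      have : (arr.drop i).drop 1 = t := by rw [hd]; rfl
      rwa [List.drop_drop] at this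
    rw [PySem.List.pyRange_one_cons (by exact_mod_cast hilen), List.foldl_cons]
    have hprev : (PySem.List.pyGet? arr ((i : Int) - 1)).getD ' ' = p := by
      have h1 : ((i : Int) - 1) = ((i - 1 : Nat) : Int) := by omega
      rw [h1, PySem.List.pyGet?_natCast, hp]; rfl
    have hcur : (PySem.List.pyGet? arr (i : Int)).getD ' ' = c := by
      rw [PySem.List.pyGet?_natCast, hci]; rfl
    have htn : (i : Int).toNat = i := by omega
    have htn1 : ((i : Int) - 1).toNat = i - 1 := by omega
    have hcast : ((i : Int) + 1) = ((i + 1 : Nat) : Int) := by omega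
    by_cases h1 : p = 'R' ∧ c = 'L'
    · obtain ⟨hpv, hcv⟩ := h1
      subst hpv; subst hcv
      have hstep : pvStepA (arr, cnt, r) (i : Int)
          = ((arr.set (i - 1) 'S').set i 'S', cnt + (2 + r), 0) := by
        unfold pvStepA
        dsimp only
        rw [hprev, hcur]
        simp [htn, htn1]
      rw [hstep]
      set arr' := (arr.set (i - 1) 'S').set i 'S' with harr'
      have hlen' : (arr'.length : Int) = (arr.length : Int) := by simp [harr']
      have hd' : arr'.drop (i + 1) = t := by
        rw [harr', pv_drop_set_of_lt _ _ _ _ (by omega),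
            pv_drop_set_of_lt _ _ _ _ (by omega), hd1]
      have hp' : arr'[(i + 1) - 1]? = some 'S' := by
        simp only [harr', Nat.add_sub_cancel]
        exact List.getElem?_set_self (by simpa using hilen)
      rw [hcast, ← hlen', ih arr' (i + 1) 'S' (cnt + (2 + r)) 0 (by omega) hd' hp']
      rw [show pvAuto 'R' r ('L' :: t) = 2 + r + pvAuto 'S' 0 t by rw [pvAuto]; simp]
      ring
    · by_cases h2 : p = 'S' ∧ c = 'L'
      · obtain ⟨hpv, hcv⟩ := h2
        subst hpv; subst hcv
        have hstep : pvStepA (arr, cnt, r) (i : Int)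
            = (arr.set i 'S', cnt + 1, r) := by
          unfold pvStepA
          dsimp only
          rw [hprev, hcur]
          simp [htn, htn1]
        rw [hstep]
        set arr' := arr.set i 'S' with harr'
        have hlen' : (arr'.length : Int) = (arr.length : Int) := by simp [harr']
        have hd' : arr'.drop (i + 1) = t := by
          rw [harr', pv_drop_set_of_lt _ _ _ _ (by omega), hd1]
        have hp' : arr'[(i + 1) - 1]? = some 'S' := by
          simp only [harr', Nat.add_sub_cancel]
          exact List.getElem?_set_self hilen
        rw [hcast, ← hlen', ih arr' (i + 1) 'S' (cnt + 1) r (by omega) hd' hp']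
        rw [show pvAuto 'S' r ('L' :: t) = 1 + pvAuto 'S' r t by rw [pvAuto]; simp]
        ring
      · by_cases h3 : p = 'R' ∧ c = 'S'
        · obtain ⟨hpv, hcv⟩ := h3
          subst hpv; subst hcv
          have hstep : pvStepA (arr, cnt, r) (i : Int)
              = (arr.set (i - 1) 'S', cnt + (1 + r), 0) := by
            unfold pvStepA
            dsimp only
            rw [hprev, hcur]
            simp [htn, htn1]
          rw [hstep]
          set arr' := arr.set (i - 1) 'S' with harr'
          have hlen' : (arr'.length : Int) = (arr.length : Int) := by simp [harr']
          have hd' : arr'.drop (i + 1) = t := by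
            rw [harr', pv_drop_set_of_lt _ _ _ _ (by omega), hd1]
          have hp' : arr'[(i + 1) - 1]? = some 'S' := by
            simp only [harr', Nat.add_sub_cancel]
            rw [List.getElem?_set_ne (by omega)]
            exact hci
          rw [hcast, ← hlen', ih arr' (i + 1) 'S' (cnt + (1 + r)) 0 (by omega) hd' hp']
          rw [show pvAuto 'R' r ('S' :: t) = 1 + r + pvAuto 'S' 0 t by rw [pvAuto]; simp]
          ring
        · by_cases h4 : p = 'R' ∧ c = 'R'
          · obtain ⟨hpv, hcv⟩ := h4
            subst hpv; subst hcv
            have hstep : pvStepA (arr, cnt, r) (i : Int) = (arr, cnt, r + 1) := by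
              unfold pvStepA
              dsimp only
              rw [hprev, hcur]
              simp
            rw [hstep]
            have hp' : arr[(i + 1) - 1]? = some 'R' := by
              simpa only [Nat.add_sub_cancel] using hci
            rw [hcast, ih arr (i + 1) 'R' cnt (r + 1) (by omega) hd1 hp']
            rw [show pvAuto 'R' r ('R' :: t) = pvAuto 'R' (r + 1) t by rw [pvAuto]; simp]
          · have hstep : pvStepA (arr, cnt, r) (i : Int) = (arr, cnt, r) := by
              unfold pvStepA
              dsimp only
              rw [hprev, hcur]
              rw [if_neg (by simp; tauto), if_neg (by simp; tauto),
                  if_neg (by simp; tauto), if_neg (by simp; tauto)]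
            rw [hstep]
            have hp' : arr[(i + 1) - 1]? = some c := by
              simpa only [Nat.add_sub_cancel] using hci
            rw [hcast, ih arr (i + 1) c cnt r (by omega) hd1 hp']
            rw [show pvAuto p r (c :: t) = pvAuto c r t by rw [pvAuto]; simp [h1, h2, h3, h4]]

theorem pvA_eq_auto (s : String) :
    countCollisions s = match s.toList with
      | [] => 0
      | c :: t => pvAuto c 0 t := by
  unfold countCollisions
  cases h : s.toList with
  | nil => simp [h, PySem.List.pyRange_one_eq_nil]
  | cons c t =>
    simp only [h]
    have := pvLoopA t (c :: t) 1 c 0 0 (by omega) (by simp) (by simp)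
    simpa using this

-- ---------- B's three passes compute pvEvs / pvRrc / pvLcc ----------

theorem pvB_events : ∀ (t : List Char) (c : Char),
    ((c :: t).zip t).countP (fun ab => ab.1 == 'R' && (ab.2 == 'L' || ab.2 == 'S'))
      = pvEvs c t := by
  intro t
  induction t with
  | nil => intro c; rfl
  | cons b t ih =>
    intro c
    rw [show (c :: b :: t).zip (b :: t) = (c, b) :: ((b :: t).zip t) by rfl,
        List.countP_cons, ih]
    by_cases h : c = 'R' ∧ (b = 'L' ∨ b = 'S')
    · obtain ⟨h1, h2⟩ := h
      subst h1
      rcases h2 with h2 | h2 <;> subst h2 <;> simp [pvEvs, Nat.add_comm]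
    · have : (c == 'R' && (b == 'L' || b == 'S')) = false := by
        simp only [beq_iff_eq, Bool.and_eq_false_iff, Bool.or_eq_false_iff]
        by_cases hc : c = 'R'
        · right; constructor <;> simp [beq_iff_eq] <;> tauto
        · left; simpa using hc
      simp [pvEvs, this, h]
  
theorem pvB_rr : ∀ (t : List Char) (c : Char),
    ((c :: t).zip t).foldr (fun ab st => pvStepSeen st ab) ((0 : Int), false)
      = ((pvRrc c t : Int), pvHasE c t) := by
  intro t
  induction t with
  | nil => intro c; rfl
  | cons b t ih =>
    intro c
    rw [show (c :: b :: t).zip (b :: t) = (c, b) :: ((b :: t).zip t) by rfl,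
        List.foldr_cons, ih]
    show pvStepSeen ((pvRrc b t : Int), pvHasE b t) (c, b)
      = ((pvRrc c (b :: t) : Int), pvHasE c (b :: t))
    by_cases h : c = 'R' ∧ (b = 'L' ∨ b = 'S')
    · obtain ⟨h1, h2⟩ := h
      subst h1
      rcases h2 with h2 | h2 <;> subst h2 <;> simp [pvStepSeen, pvRrc, pvHasE]
    · by_cases hrr : c = 'R' ∧ b = 'R' ∧ pvHasE b t = true
      · obtain ⟨h1, h2, h3⟩ := hrr
        subst h1; subst h2
        have hstep : pvStepSeen ((pvRrc 'R' t : Int), pvHasE 'R' t) ('R', 'R')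
            = ((pvRrc 'R' t : Int) + 1, pvHasE 'R' t) := by
          unfold pvStepSeen
          dsimp only
          rw [if_neg (by simp), if_pos (by simp [h3])]
        rw [hstep]
        have h4 : pvRrc 'R' ('R' :: t) = 1 + pvRrc 'R' t := by
          rw [pvRrc]; simp [h3]
        have h5 : pvHasE 'R' ('R' :: t) = pvHasE 'R' t := by
          rw [pvHasE]; simp
        rw [h4, h5, Prod.mk.injEq]
        exact ⟨by push_cast; ring, rfl⟩
      · have hstep : pvStepSeen ((pvRrc b t : Int), pvHasE b t) (c, b)
            = ((pvRrc b t : Int), pvHasE b t) := by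
          unfold pvStepSeen
          dsimp only
          rw [if_neg (by simp; tauto),
              if_neg (by simp; intro h1 h2; exact Bool.eq_false_iff.mpr (fun hE => hrr ⟨h1, h2, hE⟩))]
        rw [hstep]
        have h4 : pvRrc c (b :: t) = pvRrc b t := by
          rw [pvRrc]
          have : ¬ (c = 'R' ∧ b = 'R' ∧ pvHasE b t) := by tauto
          simp [this]
        have h5 : pvHasE c (b :: t) = pvHasE b t := by
          rw [pvHasE]
          simp [h]
        rw [h4, h5]

theorem pvB_lc : ∀ (l : List Char) (near : Option Char) (acc : Int),
    (l.foldl pvStepNear (near, acc)).2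
      = acc + (pvLcc (near == some 'R' || near == some 'S') l : Int) := by
  intro l
  induction l with
  | nil => intro near acc; simp [pvLcc]
  | cons c t ih =>
    intro near acc
    rw [List.foldl_cons]
    by_cases hc : c = 'L'
    · subst hc
      by_cases hq : (near == some 'R' || near == some 'S') = true
      · have hstep : pvStepNear (near, acc) 'L' = (near, acc + 1) := by
          unfold pvStepNear
          dsimp only
          rw [if_neg (by simp), if_pos hq]
        rw [hstep, ih]
        have h4 : pvLcc (near == some 'R' || near == some 'S') ('L' :: t)
            = 1 + pvLcc (near == some 'R' || near == some 'S') t := by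
          rw [pvLcc]; simp [hq]
        rw [h4]
        push_cast; ring
      · have hstep : pvStepNear (near, acc) 'L' = (near, acc) := by
          unfold pvStepNear
          dsimp only
          rw [if_neg (by simp), if_neg hq]
        rw [hstep, ih]
        have hq' : (near == some 'R' || near == some 'S') = false := Bool.eq_false_iff.mpr hq
        have h4 : pvLcc (near == some 'R' || near == some 'S') ('L' :: t)
            = pvLcc (near == some 'R' || near == some 'S') t := by
          rw [pvLcc]
          simp [hq']
        rw [h4]
    · have hstep : pvStepNear (near, acc) c = (some c, acc) := by
        unfold pvStepNear
        dsimp only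
        rw [if_pos (by simpa using hc)]
      rw [hstep, ih]
      have hbeq : (some c == some 'R' || some c == some 'S') = decide (c = 'R' ∨ c = 'S') := by
        by_cases h1 : c = 'R' <;> by_cases h2 : c = 'S' <;> simp [h1, h2]
      rw [hbeq]
      have h4 : pvLcc (near == some 'R' || near == some 'S') (c :: t)
          = pvLcc (decide (c = 'R' ∨ c = 'S')) t := by
        rw [pvLcc]; simp [hc]
      rw [h4]

theorem pvLcc_false_cons (c : Char) (t : List Char) :
    pvLcc false (c :: t) = pvLcc (decide (c = 'R' ∨ c = 'S')) t := by
  by_cases hc : c = 'L'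
  · subst hc; simp [pvLcc]
  · simp [pvLcc, hc]

theorem pvB_eq_auto (s : String) :
    countCollisions_alt s = match s.toList with
      | [] => 0
      | c :: t => pvAuto c 0 t := by
  unfold countCollisions_alt
  cases h : s.toList with
  | nil => simp [h, pvStepNear]
  | cons c t =>
    simp only [h, List.drop_one, List.tail_cons]
    rw [List.foldl_reverse, pvB_rr t c, pvB_events t c, pvB_lc (c :: t) none 0]
    have hq : ((none : Option Char) == some 'R' || (none : Option Char) == some 'S') = false := rfl
    rw [hq, pvLcc_false_cons, pvAuto_decomp]
    by_cases hE : pvHasE c t <;> simp [hE] <;> ring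

-- ===== VERDICT (by name: the statement is the Claim_ definition above) =====
theorem countCollisions_spec : Claim_equal_countCollisions := by
  intro s _
  unfold Spec_countCollisions
  rw [pvA_eq_auto, pvB_eq_auto]
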